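-- pv_equiv track=rewrite | github.com/2birdsilver/Programmers | 프로그래머스/2/87390. n＾2 배열 자르기/n＾2 배열 자르기.py | solution
-- ===== SOURCE A (Python) =====
-- def solution(n, left, right):
--     answer = []
--
--     for i in range(left, right+1):
--         share = i // n
--         remain = i % n
--         value = max(share, remain) + 1
--         answer.append(value)
--
--     return answer
-- ===== SOURCE B (Python) =====
-- def solution(n, left, right):
--     # Row-by-row: row r of the n x n grid holds r+1 in columns 0..r and c+1 in columns c > r;
--     # emit, for each touched row, only the columns inside the [left, right] window.
--     ans = []
--     lo = left
--     while lo <= right: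
--         r = lo // n
--         row_end = min(right, (r + 1) * n - 1)
--         k = min(max(r + 1, 0), n)            # columns 0..k-1 hold r+1, columns k..n-1 hold c+1
--         c0, c1 = lo - r * n, row_end - r * n
--         ans += [r + 1] * max(min(k, c1 + 1) - c0, 0)
--         ans += range(max(k, c0) + 1, c1 + 2)
--         lo = row_end + 1
--     return ans
-- ===== Notes on version B (the rewrite author's own statement) =====
-- stated objective: alternative
-- what changed: Replaces the per-index loop computing max(i//n, i%n)+1 with row-by-row generation: for each touched row it emits, in closed form, the constant run ((r+1) repeated) and the increasing run (r+2..) restricted to the [left,right] window.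
-- outside the precondition, e.g. on solution(-2, 0, 1): A returns [1, 0], B does not finish within the time limit
import Mathlib
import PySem

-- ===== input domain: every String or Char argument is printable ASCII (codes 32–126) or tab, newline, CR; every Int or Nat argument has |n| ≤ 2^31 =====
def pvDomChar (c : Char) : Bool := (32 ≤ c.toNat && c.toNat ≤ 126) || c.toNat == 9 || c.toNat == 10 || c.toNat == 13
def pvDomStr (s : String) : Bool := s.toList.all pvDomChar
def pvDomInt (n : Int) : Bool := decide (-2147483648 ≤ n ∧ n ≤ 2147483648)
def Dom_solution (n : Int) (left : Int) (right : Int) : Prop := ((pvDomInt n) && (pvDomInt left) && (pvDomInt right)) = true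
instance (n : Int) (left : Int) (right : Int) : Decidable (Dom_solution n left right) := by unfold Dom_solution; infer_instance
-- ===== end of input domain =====

-- B replaces the per-index max(i//n, i%n)+1 loop by row-by-row generation: per touched row it
-- emits the window's constant run (r+1 repeated) and increasing run (c+1) in closed form ("alternative").

-- ===== PORT A =====
def solution (n : Int) (left : Int) (right : Int) : List Int :=
  (PySem.List.pyRange left (right + 1) 1).foldl
    (fun answer i =>
      let share := PySem.Int.floordiv i n
      let remain := PySem.Int.mod i n
      let value := max share remain + 1
      answer ++ [value]) []

-- ===== PORT B =====
-- the while loop of Source B; fuel only makes the recursion total (it never runs out when 1 ≤ n)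
def solutionAltLoop (n : Int) (right : Int) (fuel : Nat) (lo : Int) (ans : List Int) : List Int :=
  match fuel with
  | 0 => ans
  | fuel + 1 =>
    if lo ≤ right then
      let r := PySem.Int.floordiv lo n
      let rowEnd := min right ((r + 1) * n - 1)
      let k := min (max (r + 1) 0) n
      let c0 := lo - r * n
      let c1 := rowEnd - r * n
      solutionAltLoop n right fuel (rowEnd + 1)
        (ans ++ (List.replicate (max (min k (c1 + 1) - c0) 0).toNat (r + 1)
                  ++ PySem.List.pyRange (max k c0 + 1) (c1 + 2) 1))
    else ans

def solution_alt (n : Int) (left : Int) (right : Int) : List Int :=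
  solutionAltLoop n right ((right + 1 - left).toNat + 1) left []

-- ===== PRECONDITION & SPEC =====
-- Pre_ restricts to the task's natural domain (n is the side of an n×n grid) plus the trivial empty
-- window: for n = 0 with a nonempty window A raises ZeroDivisionError; for n < 0 with a nonempty
-- window A returns floor-division artifacts on a meaningless grid and B diverges.
def Pre_solution (n : Int) (left : Int) (right : Int) : Prop := 1 ≤ n ∨ right < left
instance (n : Int) (left : Int) (right : Int) : Decidable (Pre_solution n left right) := by unfold Pre_solution; infer_instance

def pvWitness_solution : Int × Int × Int := (3, 2, 5)

def Spec_solution (n : Int) (left : Int) (right : Int) (out : List Int) : Prop := out = solution_alt n left right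
instance (n : Int) (left : Int) (right : Int) (out : List Int) : Decidable (Spec_solution n left right out) := by unfold Spec_solution; infer_instance

-- ===== CLAIM (what is proved, stated in full; the proofs are below) =====
def Claim_equal_solution : Prop := ∀ (n : Int) (left : Int) (right : Int), Dom_solution n left right → Pre_solution n left right → Spec_solution n left right (solution n left right)

-- ===== LEMMAS AND PROOFS =====

-- the value A computes at index i
def cellVal (n i : Int) : Int := max (PySem.Int.floordiv i n) (PySem.Int.mod i n) + 1

theorem solution_eq_map (n left right : Int) :
    solution n left right = (PySem.List.pyRange left (right + 1) 1).map (cellVal n) := by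
  show (PySem.List.pyRange left (right + 1) 1).foldl
      (fun answer i => answer ++ [cellVal n i]) [] = _
  rw [PySem.List.foldl_append_singleton_eq_map]
  simp

theorem pyRange_shift (a b t : Int) :
    PySem.List.pyRange (a + t) (b + t) 1 = (PySem.List.pyRange a b 1).map (· + t) := by
  simp only [PySem.List.pyRange_one, List.map_map]
  have : (b + t - (a + t)).toNat = (b - a).toNat := by omega
  rw [this]
  exact List.map_congr_left (fun j _ => by simp; ring)

-- the emitted window of one row, in column coordinates
theorem emit_cols_eq (n r c0 c1 : Int) (hn : 1 ≤ n)
    (h0 : 0 ≤ c0) (hc : c0 ≤ c1) (hcn : c1 < n) :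
    List.replicate (max (min (min (max (r + 1) 0) n) (c1 + 1) - c0) 0).toNat (r + 1)
        ++ PySem.List.pyRange (max (min (max (r + 1) 0) n) c0 + 1) (c1 + 2) 1
      = (PySem.List.pyRange c0 (c1 + 1) 1).map (fun c => max r c + 1) := by
  set k := min (max (r + 1) 0) n with hk
  set t := min (max k c0) (c1 + 1) with ht
  have hc0t : c0 ≤ t := by omega
  have htc1 : t ≤ c1 + 1 := by omega
  rw [PySem.List.pyRange_one_append c0 t (c1 + 1) hc0t htc1, List.map_append]
  congr 1
  · have : (PySem.List.pyRange c0 t 1).map (fun c => max r c + 1)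
        = (PySem.List.pyRange c0 t 1).map (fun _ => r + 1) := by
      apply List.map_congr_left
      intro c hcmem
      have := (PySem.List.mem_pyRange_one).1 hcmem
      have : max r c = r := by omega
      simp [this]
    rw [this, List.map_const']
    simp only [PySem.List.length_pyRange_one]
    congr 1
    omega
  · by_cases hsplit : max k c0 ≤ c1 + 1
    · have : max k c0 = t := by omega
      rw [this, show c1 + 2 = c1 + 1 + 1 by ring, pyRange_shift t (c1 + 1) 1]
      apply List.map_congr_left
      intro c hcmem
      have := (PySem.List.mem_pyRange_one).1 hcmem
      have : max r c = c := by omega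
      simp [this]
    · rw [PySem.List.pyRange_one_eq_nil (by omega), PySem.List.pyRange_one_eq_nil (by omega)]
      simp

theorem loop_eq (n right : Int) (hn : 1 ≤ n) :
    ∀ (fuel : Nat) (lo : Int) (ans : List Int), (right + 1 - lo).toNat < fuel →
      solutionAltLoop n right fuel lo ans
        = ans ++ (PySem.List.pyRange lo (right + 1) 1).map (cellVal n) := by
  intro fuel
  induction fuel with
  | zero => intro lo ans h; omega
  | succ fuel ih =>
    intro lo ans hfuel
    by_cases hlo : lo ≤ right
    · rw [solutionAltLoop]
      simp only [hlo, if_true]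
      set r := PySem.Int.floordiv lo n with hrdef
      have h1 : (r + 1) * n = r * n + n := by ring
      have hr := (PySem.Int.floordiv_eq_iff_of_pos (by omega : (0:Int) < n)).1 hrdef.symm
      set rowEnd := min right ((r + 1) * n - 1) with hre
      have hre2 : rowEnd ≤ r * n + n - 1 := by
        have := min_le_right right ((r + 1) * n - 1); omega
      have hlore : lo ≤ rowEnd := by
        have := le_min hlo (by omega : lo ≤ (r + 1) * n - 1); omega
      have hfuel' : (right + 1 - (rowEnd + 1)).toNat < fuel := by omega
      rw [ih (rowEnd + 1) _ hfuel']
      have hemit : List.replicate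
            (max (min (min (max (r + 1) 0) n) (rowEnd - r * n + 1) - (lo - r * n)) 0).toNat (r + 1)
            ++ PySem.List.pyRange (max (min (max (r + 1) 0) n) (lo - r * n) + 1) (rowEnd - r * n + 2) 1
          = (PySem.List.pyRange lo (rowEnd + 1) 1).map (cellVal n) := by
        rw [emit_cols_eq n r (lo - r * n) (rowEnd - r * n) hn (by omega) (by omega) (by omega)]
        have hsh : PySem.List.pyRange (lo - r * n) (rowEnd - r * n + 1) 1
            = (PySem.List.pyRange lo (rowEnd + 1) 1).map (· + (-(r * n))) := by
          have := pyRange_shift lo (rowEnd + 1) (-(r * n))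
          rw [show lo + -(r * n) = lo - r * n by ring,
              show rowEnd + 1 + -(r * n) = rowEnd - r * n + 1 by ring] at this
          exact this
        rw [hsh, List.map_map]
        apply List.map_congr_left
        intro i hi
        have hmem := (PySem.List.mem_pyRange_one).1 hi
        have hdiv : PySem.Int.floordiv i n = r := by
          rw [PySem.Int.floordiv_eq_iff_of_pos (by omega)]
          omega
        have hmod : PySem.Int.mod i n = i - r * n := by
          have h := PySem.Int.floordiv_mul_add_mod i n
          rw [hdiv] at h
          omega
        simp only [Function.comp, cellVal, hdiv, hmod]
        have : i - r * n = i + -(r * n) := by ring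
        rw [this]
      rw [hemit]
      rw [PySem.List.pyRange_one_append lo (rowEnd + 1) (right + 1) (by omega) (by omega),
        List.map_append, List.append_assoc]
    · rw [solutionAltLoop]
      simp only [hlo, if_false]
      rw [PySem.List.pyRange_one_eq_nil (by omega)]
      simp

-- ===== VERDICT (by name: the statement is the Claim_ definition above) =====
theorem solution_spec : Claim_equal_solution := by
  intro n left right _ hpre
  unfold Spec_solution solution_alt
  rcases hpre with hn | hrl
  · rw [loop_eq n right hn _ left [] (by omega), solution_eq_map]
    simp
  · have halt : solutionAltLoop n right ((right + 1 - left).toNat + 1) left [] = [] := by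
      rw [solutionAltLoop]
      simp [not_le.mpr hrl]
    rw [halt, solution_eq_map, PySem.List.pyRange_one_eq_nil (by omega)]
    simp
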